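-- pv_equiv track=rewrite | github.com/swethac18/machine-learning | ML-Engine_implementation/UnitTesting.py | queryConstructionFormat
-- ===== SOURCE A (Python) =====
-- def queryConstructionFormat(query):
--   stack = []
--   for ch in query:
--     if ch == '{':
--       stack.append(ch)
--     if ch == '}':
--       stack = stack[-1:]
--   return len(stack)
-- ===== SOURCE B (Python) =====
-- def queryConstructionFormat(query):
--   # Closed form: after each '}' the stack collapses to at most one element,
--   # so the final length is (1 if any '{' before the last '}') + count of '{' after it.
--   pre, sep, suf = query.rpartition('}')
--   n = suf.count('{')
--   return n + 1 if sep and '{' in pre else n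
-- ===== Notes on version B (the rewrite author's own statement) =====
-- stated objective: simpler
-- what changed: Replaces A's left-to-right stack simulation with a closed form: rpartition the string at its last closing brace, return the count of opening braces after it plus 1 if any opening brace occurs before it (or the total opening-brace count if there is no closing brace).
import Mathlib
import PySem

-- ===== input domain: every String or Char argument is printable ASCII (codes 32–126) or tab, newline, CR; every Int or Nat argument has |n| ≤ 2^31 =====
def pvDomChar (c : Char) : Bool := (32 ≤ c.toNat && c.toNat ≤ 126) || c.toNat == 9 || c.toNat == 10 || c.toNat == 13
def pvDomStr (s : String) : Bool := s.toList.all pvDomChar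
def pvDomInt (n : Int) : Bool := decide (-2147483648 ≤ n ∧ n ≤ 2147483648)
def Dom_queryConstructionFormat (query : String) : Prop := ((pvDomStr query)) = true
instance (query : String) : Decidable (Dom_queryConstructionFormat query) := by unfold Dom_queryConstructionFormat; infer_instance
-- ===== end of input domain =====

-- B replaces A's left-to-right stack simulation by a closed form: split at the last '}'
-- and count '{' in the two regions (objective: simpler).

-- ===== PORT A =====
-- one loop iteration of A's for-loop body
def pvStepA (stack : List Char) (ch : Char) : List Char :=
  let stack1 := if ch == '{' then stack ++ [ch] else stack
  if ch == '}' then PySem.List.slice stack1 (some (-1)) none else stack1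

def queryConstructionFormat (query : String) : Int :=
  ((query.toList.foldl pvStepA []).length : Int)

-- ===== PORT B =====
-- port of query.rpartition('}') on the char list: some (pre, suf) with
-- query = pre ++ '}' :: suf and no '}' in suf; none if '}' is absent
def pvSplitLastBrace : List Char → Option (List Char × List Char)
  | [] => none
  | c :: cs =>
    match pvSplitLastBrace cs with
    | some (p, s) => some (c :: p, s)
    | none => if c = '}' then some ([], cs) else none

def queryConstructionFormat_alt (query : String) : Int :=
  match pvSplitLastBrace query.toList with
  | none => (query.toList.count '{' : Int)
  | some (p, s) => (s.count '{' : Int) + (if '{' ∈ p then 1 else 0)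

-- ===== PRECONDITION & SPEC =====
def Spec_queryConstructionFormat (query : String) (out : Int) : Prop := out = queryConstructionFormat_alt query
instance (query : String) (out : Int) : Decidable (Spec_queryConstructionFormat query out) := by unfold Spec_queryConstructionFormat; infer_instance

-- ===== CLAIM (what is proved, stated in full; the proofs are below) =====
def Claim_equal_queryConstructionFormat : Prop := ∀ (query : String), Dom_queryConstructionFormat query → Spec_queryConstructionFormat query (queryConstructionFormat query)

-- ===== LEMMAS AND PROOFS =====

lemma pvStepA_not_close (stack : List Char) (ch : Char) (h : ch ≠ '}') :
    pvStepA stack ch = if ch == '{' then stack ++ [ch] else stack := by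
  simp [pvStepA, h]

lemma pvStepA_close (stack : List Char) :
    pvStepA stack '}' = stack.drop (stack.length - 1) := by
  simp [pvStepA, PySem.List.slice_from_neg_one]

-- a '}'-free segment only appends: the length grows by the number of '{'
lemma foldl_len_no_close (cs : List Char) (stack : List Char) (h : '}' ∉ cs) :
    (cs.foldl pvStepA stack).length = stack.length + cs.count '{' := by
  induction cs generalizing stack with
  | nil => simp
  | cons c cs ih =>
    have hc : c ≠ '}' := fun hc => h (hc ▸ List.mem_cons_self)
    have hcs : '}' ∉ cs := fun hm => h (List.mem_cons_of_mem _ hm)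
    rw [List.foldl_cons, pvStepA_not_close _ _ hc, ih _ hcs]
    by_cases hb : c = '{' <;> simp [hb]; omega

-- the stack ends empty iff it started empty and no '{' was seen
lemma foldl_empty_iff (cs : List Char) (stack : List Char) :
    cs.foldl pvStepA stack = [] ↔ (stack = [] ∧ '{' ∉ cs) := by
  induction cs generalizing stack with
  | nil => simp
  | cons c cs ih =>
    rw [List.foldl_cons, ih]
    constructor
    · rintro ⟨h1, h2⟩
      by_cases hb : c = '{'
      · exfalso
        subst hb
        simp [pvStepA] at h1
      · refine ⟨?_, by simp [h2, Ne.symm hb]⟩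
        by_cases hcl : c = '}'
        · subst hcl
          rw [pvStepA_close] at h1
          cases stack with
          | nil => rfl
          | cons a t => simp [List.drop_eq_nil_iff] at h1
        · rwa [pvStepA_not_close _ _ hcl, if_neg (by simp [hb])] at h1
    · rintro ⟨h1, h2⟩
      subst h1
      have hb : c ≠ '{' := fun hb => h2 (by simp [hb])
      refine ⟨?_, fun hm => h2 (List.mem_cons_of_mem _ hm)⟩
      by_cases hcl : c = '}'
      · subst hcl; rw [pvStepA_close]; simp
      · rw [pvStepA_not_close _ _ hcl, if_neg (by simp [hb])]

lemma pvSplitLastBrace_none (cs : List Char) :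
    pvSplitLastBrace cs = none ↔ '}' ∉ cs := by
  induction cs with
  | nil => simp [pvSplitLastBrace]
  | cons c cs ih =>
    rw [pvSplitLastBrace]
    cases h : pvSplitLastBrace cs with
    | some v => simp [ih.symm, h]
    | none =>
      have hcs := ih.mp h
      by_cases hc : c = '}'
      · simp [hc]
      · simp [hc, hcs]
        exact Ne.symm hc

lemma pvSplitLastBrace_some (cs p s : List Char) (h : pvSplitLastBrace cs = some (p, s)) :
    cs = p ++ '}' :: s ∧ '}' ∉ s := by
  induction cs generalizing p with
  | nil => simp [pvSplitLastBrace] at h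
  | cons c cs ih =>
    rw [pvSplitLastBrace] at h
    cases hrec : pvSplitLastBrace cs with
    | some v =>
      obtain ⟨p', s'⟩ := v
      rw [hrec] at h
      simp at h
      obtain ⟨hp, hs⟩ := h
      obtain ⟨heq, hns⟩ := ih p' (by rw [hrec, hs])
      refine ⟨?_, hns⟩
      rw [← hp, heq]
      simp
    | none =>
      rw [hrec] at h
      by_cases hc : c = '}'
      · simp [hc] at h
        obtain ⟨hp, hs⟩ := h
        subst hs
        exact ⟨by simp [hc, hp], (pvSplitLastBrace_none _).mp hrec⟩
      · simp [hc] at h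

-- ===== VERDICT (by name: the statement is the Claim_ definition above) =====
theorem queryConstructionFormat_spec : Claim_equal_queryConstructionFormat := by
  intro query _
  unfold Spec_queryConstructionFormat queryConstructionFormat queryConstructionFormat_alt
  cases h : pvSplitLastBrace query.toList with
  | none =>
    have hnc := (pvSplitLastBrace_none query.toList).mp h
    rw [foldl_len_no_close _ _ hnc]
    simp
  | some v =>
    obtain ⟨p, s⟩ := v
    obtain ⟨heq, hns⟩ := pvSplitLastBrace_some _ _ _ h
    rw [heq, List.foldl_append, List.foldl_cons, pvStepA_close,
        foldl_len_no_close _ _ hns]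
    by_cases hp : '{' ∈ p
    · have hne : p.foldl pvStepA [] ≠ [] := by
        rw [Ne, foldl_empty_iff]; tauto
      have hlen : 0 < (p.foldl pvStepA []).length := List.length_pos_iff.mpr hne
      rw [List.length_drop]
      simp [hp]
      omega
    · have he : p.foldl pvStepA [] = [] := (foldl_empty_iff _ _).mpr ⟨rfl, hp⟩
      simp [he, hp]
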